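-- pv_equiv track=rewrite | github.com/Ale2801/AcademiaPro | backend/scripts/configure_env.py | _format_env_value
-- ===== SOURCE A (Python) =====
-- def _format_env_value(value: str) -> str:
--     if value is None:
--         return ""
--     needs_quotes = any(ch in value for ch in ' #"\n')
--     if needs_quotes:
--         escaped = value.replace("\\", "\\\\").replace('"', '\\"')
--         return f'"{escaped}"'
--     return value
-- ===== SOURCE B (Python) =====
-- def _format_env_value(value: str) -> str:
--     if value is None:
--         return ""
--     escaped = []
--     needs_quotes = False
--     for ch in value:
--         if ch == "\\":
--             escaped.append("\\\\")
--         elif ch == '"':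
--             escaped.append('\\"')
--         else:
--             escaped.append(ch)
--         if ch in ' #"\n':
--             needs_quotes = True
--     if needs_quotes:
--         return '"' + "".join(escaped) + '"'
--     return value
-- ===== Notes on version B (the rewrite author's own statement) =====
-- stated objective: alternative
-- what changed: A scans the string up to four times for trigger characters and then runs two whole-string replace passes; B makes a single fused pass that builds the escaped text and the needs_quotes flag together.
import Mathlib
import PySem

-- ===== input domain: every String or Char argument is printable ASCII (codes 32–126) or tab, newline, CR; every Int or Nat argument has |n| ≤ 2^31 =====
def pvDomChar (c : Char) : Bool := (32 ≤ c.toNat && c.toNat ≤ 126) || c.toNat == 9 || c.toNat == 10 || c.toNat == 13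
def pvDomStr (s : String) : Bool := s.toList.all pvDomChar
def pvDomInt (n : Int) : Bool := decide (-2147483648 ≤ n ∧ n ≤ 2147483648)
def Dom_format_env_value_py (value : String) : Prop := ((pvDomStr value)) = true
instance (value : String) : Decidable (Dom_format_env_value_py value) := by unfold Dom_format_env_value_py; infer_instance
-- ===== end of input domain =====

-- B re-implements A's two-pass "detect then escape-by-replace" as ONE fused loop over the
-- characters that builds the escaped text and the needs_quotes flag together (objective: alternative).

-- ===== PORT A =====
-- A: needs_quotes = any(ch in value for ch in ' #"\n'); for a single character ch,
-- `ch in value` is exactly list membership, i.e. List.contains (exact on all inputs).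
-- escaped = value.replace("\\","\\\\").replace('"','\\"') via PySem.Chars.replace.
def format_env_value_py (value : String) : String :=
  let cs := value.toList
  let needs_quotes := [' ', '#', '"', '\n'].any (fun ch => cs.contains ch)
  if needs_quotes then
    let escaped := PySem.Chars.replace (PySem.Chars.replace cs ['\\'] ['\\', '\\']) ['"'] ['\\', '"']
    String.mk ('"' :: escaped ++ ['"'])
  else value

-- ===== PORT B =====
-- single fused loop: accumulate escaped chars and the needs_quotes flag in one pass
def format_env_value_py_alt (value : String) : String :=
  let step := fun (p : List Char × Bool) (ch : Char) =>
    (p.1 ++ (if ch = '\\' then ['\\', '\\'] else if ch = '"' then ['\\', '"'] else [ch]),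
     p.2 || (ch = ' ' || ch = '#' || ch = '"' || ch = '\n'))
  let r := value.toList.foldl step ([], false)
  if r.2 then String.mk ('"' :: r.1 ++ ['"']) else value

-- ===== PRECONDITION & SPEC =====
def Spec_format_env_value_py (value : String) (out : String) : Prop := out = format_env_value_py_alt value
instance (value : String) (out : String) : Decidable (Spec_format_env_value_py value out) := by unfold Spec_format_env_value_py; infer_instance

-- ===== CLAIM (what is proved, stated in full; the proofs are below) =====
def Claim_equal_format_env_value_py : Prop := ∀ (value : String), Dom_format_env_value_py value → Spec_format_env_value_py value (format_env_value_py value)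

-- ===== LEMMAS AND PROOFS =====

-- the per-character escape B performs
def pvEsc (c : Char) : List Char :=
  if c = '\\' then ['\\', '\\'] else if c = '"' then ['\\', '"'] else [c]

def pvTrig (c : Char) : Bool := (c = ' ' || c = '#' || c = '"' || c = '\n')

-- str.replace with a single-character pattern is a flatMap
theorem replace_go_single (a : Char) (new : List Char) :
    ∀ (l : List Char) (fuel : Nat) (acc : List Char), l.length ≤ fuel →
      PySem.Chars.replace.go [a] new fuel l acc
        = acc.reverse ++ l.flatMap (fun c => if a == c then new else [c]) := by
  intro l
  induction l with
  | nil =>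
      intro fuel acc _
      cases fuel <;> simp [PySem.Chars.replace.go]
  | cons c t ih =>
      intro fuel acc h
      cases fuel with
      | zero => simp at h
      | succ n =>
          simp only [PySem.Chars.replace.go, List.isPrefixOf]
          by_cases hc : a == c
          · simp only [hc, Bool.true_and]
            rw [show List.drop [a].length (c :: t) = t by simp]
            rw [ih n (new.reverse ++ acc) (by simpa using Nat.le_of_succ_le_succ h)]
            simp [eq_of_beq hc]
          · have hcf : (a == c) = false := by simpa using hc
            simp only [hcf, Bool.false_and, if_neg Bool.false_ne_true]
            rw [ih n (c :: acc) (by simpa using Nat.le_of_succ_le_succ h)]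
            have hac : ¬ a = c := by simpa using hc
            simp [if_neg hac]

theorem replace_single (cs : List Char) (a : Char) (new : List Char) :
    PySem.Chars.replace cs [a] new = cs.flatMap (fun c => if a == c then new else [c]) := by
  unfold PySem.Chars.replace
  simp only [List.isEmpty_cons, if_neg Bool.false_ne_true]
  simpa using replace_go_single a new cs cs.length [] le_rfl

-- A's two chained replaces compute the flatMap of B's per-character escape
theorem replace_chain (cs : List Char) :
    PySem.Chars.replace (PySem.Chars.replace cs ['\\'] ['\\', '\\']) ['"'] ['\\', '"']
      = cs.flatMap pvEsc := by
  rw [replace_single, replace_single, List.flatMap_assoc]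
  apply List.flatMap_congr
  intro c _
  by_cases h1 : c = '\\'
  · subst h1; decide
  · by_cases h2 : c = '"'
    · subst h2; decide
    · simp [pvEsc, h1, h2, beq_iff_eq, Ne.symm h1, Ne.symm h2]

-- invariant of B's fused loop
theorem foldB (cs : List Char) :
    ∀ (acc : List Char) (b : Bool),
      cs.foldl (fun (p : List Char × Bool) (ch : Char) =>
          (p.1 ++ (if ch = '\\' then ['\\', '\\'] else if ch = '"' then ['\\', '"'] else [ch]),
           p.2 || (ch = ' ' || ch = '#' || ch = '"' || ch = '\n'))) (acc, b)
        = (acc ++ cs.flatMap pvEsc, b || cs.any pvTrig) := by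
  induction cs with
  | nil => intro acc b; simp
  | cons c t ih =>
      intro acc b
      simp only [List.foldl_cons, ih, List.flatMap_cons, List.any_cons]
      refine Prod.ext ?_ ?_
      · simp [pvEsc]
      · simp [pvTrig, Bool.or_assoc]

-- A's any-of-four-membership test equals B's single any over the characters
theorem anyA (cs : List Char) :
    ([' ', '#', '"', '\n'].any (fun ch => cs.contains ch)) = cs.any pvTrig := by
  rw [Bool.eq_iff_iff]
  simp only [List.any_eq_true, List.contains_iff_mem, List.mem_cons, List.not_mem_nil, or_false]
  constructor
  · rintro ⟨ch, hch, hc⟩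
    refine ⟨ch, hc, ?_⟩
    rcases hch with rfl | rfl | rfl | rfl <;> decide
  · rintro ⟨c, hc, ht⟩
    have : c = ' ' ∨ c = '#' ∨ c = '"' ∨ c = '\n' := by
      simp [pvTrig] at ht; tauto
    exact ⟨c, this, hc⟩

-- ===== VERDICT (by name: the statement is the Claim_ definition above) =====
theorem format_env_value_py_spec : Claim_equal_format_env_value_py := by
  intro value _
  unfold Spec_format_env_value_py format_env_value_py format_env_value_py_alt
  simp only [foldB, List.nil_append, Bool.false_or, anyA, replace_chain]
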